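-- pv_equiv track=rewrite | github.com/nihilistau/shannon-prime | tools/sp_diagnostics.py | sqfree_pad_dim
-- ===== SOURCE A (Python) =====
-- SQFREE_PAD    = {64: 66, 96: 110, 128: 154, 256: 330}
--
-- def _is_sqfree_rich(n: int, min_distinct: int = 3) -> bool:
--     distinct, d = 0, n
--     for p in [2, 3, 5, 7, 11]:
--         if d % p == 0:
--             distinct += 1
--             d //= p
--             if d % p == 0:
--                 return False
--     return d == 1 and distinct >= min_distinct
--
-- def sqfree_pad_dim(head_dim: int) -> int:
--     if head_dim in SQFREE_PAD:
--         return SQFREE_PAD[head_dim]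
--     n = head_dim
--     while n < head_dim * 2:
--         if _is_sqfree_rich(n):
--             return n
--         n += 1
--     return head_dim
-- ===== SOURCE B (Python) =====
-- SQFREE_PAD = {64: 66, 96: 110, 128: 154, 256: 330}
--
-- # all squarefree products of >=3 distinct primes from {2,3,5,7,11}, ascending
-- _VALID = [30, 42, 66, 70, 105, 110, 154, 165, 210, 231, 330, 385, 462, 770, 1155, 2310]
--
-- def sqfree_pad_dim(head_dim: int) -> int:
--     if head_dim in SQFREE_PAD:
--         return SQFREE_PAD[head_dim]
--     for x in _VALID:
--         if head_dim <= x < 2 * head_dim: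
--             return x
--     return head_dim
-- ===== Notes on version B (the rewrite author's own statement) =====
-- stated objective: faster
-- what changed: B replaces A's O(head_dim) upward scan with _is_sqfree_rich trial division by a first-hit lookup in the precomputed ascending 16-element table of all squarefree products of >=3 distinct primes from {2,3,5,7,11}.
import Mathlib
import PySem

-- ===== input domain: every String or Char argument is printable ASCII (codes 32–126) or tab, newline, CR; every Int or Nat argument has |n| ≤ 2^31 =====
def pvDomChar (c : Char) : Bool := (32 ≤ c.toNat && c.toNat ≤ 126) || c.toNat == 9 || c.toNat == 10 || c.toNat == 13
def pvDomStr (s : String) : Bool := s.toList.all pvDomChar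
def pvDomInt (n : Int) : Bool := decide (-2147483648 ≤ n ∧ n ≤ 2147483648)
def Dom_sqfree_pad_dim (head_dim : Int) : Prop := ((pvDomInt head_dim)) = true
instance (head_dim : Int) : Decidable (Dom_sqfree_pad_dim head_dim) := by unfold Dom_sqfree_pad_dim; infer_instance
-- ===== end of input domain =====

-- B replaces A's O(head_dim) upward scan by a first-hit lookup in the fixed 16-element ascending
-- table of all squarefree products of ≥ 3 distinct primes from {2,3,5,7,11} (objective: faster).

-- ===== PORT A =====
def sqfreePadTableA : PySem.Dict Int Int :=
  PySem.Dict.ofList [(64, 66), (96, 110), (128, 154), (256, 330)]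

-- port of _is_sqfree_rich's for-loop over [2,3,5,7,11]; returning false encodes the early
-- 'return False'; the [] case is the 'return' after the loop
def isSqfreeRichLoop (primes : List Int) (distinct d min_distinct : Int) : Bool :=
  match primes with
  | [] => d == 1 && decide (distinct ≥ min_distinct)
  | p :: ps =>
    if PySem.Int.mod d p == 0 then
      let d2 := PySem.Int.floordiv d p
      if PySem.Int.mod d2 p == 0 then false
      else isSqfreeRichLoop ps (distinct + 1) d2 min_distinct
    else isSqfreeRichLoop ps distinct d min_distinct

def is_sqfree_rich (n : Int) (min_distinct : Int) : Bool :=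
  isSqfreeRichLoop [2, 3, 5, 7, 11] 0 n min_distinct

-- the while-loop of sqfree_pad_dim
def sqfreeLoopA (head_dim n : Int) : Int :=
  if _h : n < head_dim * 2 then
    if is_sqfree_rich n 3 then n else sqfreeLoopA head_dim (n + 1)
  else head_dim
termination_by (head_dim * 2 - n).toNat
decreasing_by omega

def sqfree_pad_dim (head_dim : Int) : Int :=
  match sqfreePadTableA.get? head_dim with
  | some v => v
  | none => sqfreeLoopA head_dim head_dim

-- ===== PORT B =====
def sqfreePadTableB : PySem.Dict Int Int :=
  PySem.Dict.ofList [(64, 66), (96, 110), (128, 154), (256, 330)]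

-- all squarefree products of ≥ 3 distinct primes from {2,3,5,7,11}, ascending
def pvValidB : List Int :=
  [30, 42, 66, 70, 105, 110, 154, 165, 210, 231, 330, 385, 462, 770, 1155, 2310]

def sqfree_pad_dim_alt (head_dim : Int) : Int :=
  match sqfreePadTableB.get? head_dim with
  | some v => v
  | none =>
    ((pvValidB.find? fun x => decide (head_dim ≤ x) && decide (x < 2 * head_dim))).getD head_dim

-- ===== PRECONDITION & SPEC =====
def Spec_sqfree_pad_dim (head_dim : Int) (out : Int) : Prop := out = sqfree_pad_dim_alt head_dim
instance (head_dim : Int) (out : Int) : Decidable (Spec_sqfree_pad_dim head_dim out) := by unfold Spec_sqfree_pad_dim; infer_instance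

-- ===== CLAIM (what is proved, stated in full; the proofs are below) =====
def Claim_equal_sqfree_pad_dim : Prop := ∀ (head_dim : Int), Dom_sqfree_pad_dim head_dim → Spec_sqfree_pad_dim head_dim (sqfree_pad_dim head_dim)

-- ===== LEMMAS AND PROOFS =====

lemma loop_step (p : Int) (hp : 0 < p) (ps : List Int) (distinct d m : Int) :
    isSqfreeRichLoop (p :: ps) distinct d m =
      if d % p = 0 then
        (if (d / p) % p = 0 then false else isSqfreeRichLoop ps (distinct + 1) (d / p) m)
      else isSqfreeRichLoop ps distinct d m := by
  rw [isSqfreeRichLoop]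
  simp only [PySem.Int.mod_eq_emod_of_pos hp, PySem.Int.floordiv_eq_ediv_of_pos hp,
    beq_iff_eq]

lemma loop_nil (distinct d m : Int) :
    isSqfreeRichLoop [] distinct d m = (d == 1 && decide (distinct ≥ m)) := rfl
lemma loop_step2 (ps : List Int) (distinct d m : Int) :
    isSqfreeRichLoop (2 :: ps) distinct d m =
      if d % 2 = 0 then
        (if (d / 2) % 2 = 0 then false else isSqfreeRichLoop ps (distinct + 1) (d / 2) m)
      else isSqfreeRichLoop ps distinct d m := loop_step 2 (by norm_num) ps distinct d m

lemma loop_step3 (ps : List Int) (distinct d m : Int) :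
    isSqfreeRichLoop (3 :: ps) distinct d m =
      if d % 3 = 0 then
        (if (d / 3) % 3 = 0 then false else isSqfreeRichLoop ps (distinct + 1) (d / 3) m)
      else isSqfreeRichLoop ps distinct d m := loop_step 3 (by norm_num) ps distinct d m

lemma loop_step5 (ps : List Int) (distinct d m : Int) :
    isSqfreeRichLoop (5 :: ps) distinct d m =
      if d % 5 = 0 then
        (if (d / 5) % 5 = 0 then false else isSqfreeRichLoop ps (distinct + 1) (d / 5) m)
      else isSqfreeRichLoop ps distinct d m := loop_step 5 (by norm_num) ps distinct d m

lemma loop_step7 (ps : List Int) (distinct d m : Int) :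
    isSqfreeRichLoop (7 :: ps) distinct d m =
      if d % 7 = 0 then
        (if (d / 7) % 7 = 0 then false else isSqfreeRichLoop ps (distinct + 1) (d / 7) m)
      else isSqfreeRichLoop ps distinct d m := loop_step 7 (by norm_num) ps distinct d m

lemma loop_step11 (ps : List Int) (distinct d m : Int) :
    isSqfreeRichLoop (11 :: ps) distinct d m =
      if d % 11 = 0 then
        (if (d / 11) % 11 = 0 then false else isSqfreeRichLoop ps (distinct + 1) (d / 11) m)
      else isSqfreeRichLoop ps distinct d m := loop_step 11 (by norm_num) ps distinct d m


set_option maxHeartbeats 1000000 in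
lemma L11 (distinct d : Int) (hl : isSqfreeRichLoop [11] distinct d 3 = true) :
    (distinct ≥ 3 ∧ d = 1) ∨ (distinct ≥ 2 ∧ d = 11) := by
  rw [loop_step11] at hl
  split_ifs at hl with h1 hsq
  · rw [loop_nil] at hl
    simp only [Bool.and_eq_true, beq_iff_eq, decide_eq_true_eq] at hl
    omega
  · rw [loop_nil] at hl
    simp only [Bool.and_eq_true, beq_iff_eq, decide_eq_true_eq] at hl
    omega

set_option maxHeartbeats 1000000 in
lemma L7 (distinct d : Int) (hl : isSqfreeRichLoop [7, 11] distinct d 3 = true) :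
    (distinct ≥ 3 ∧ d = 1) ∨ (distinct ≥ 2 ∧ d = 7) ∨ (distinct ≥ 2 ∧ d = 11) ∨ (distinct ≥ 1 ∧ d = 77) := by
  rw [loop_step7] at hl
  split_ifs at hl with h1 hsq
  · have h := L11 _ _ hl
    rcases h with h|h <;> omega
  · have h := L11 _ _ hl
    rcases h with h|h <;> omega

set_option maxHeartbeats 1000000 in
lemma L5 (distinct d : Int) (hl : isSqfreeRichLoop [5, 7, 11] distinct d 3 = true) :
    (distinct ≥ 3 ∧ d = 1) ∨ (distinct ≥ 2 ∧ d = 5) ∨ (distinct ≥ 2 ∧ d = 7) ∨ (distinct ≥ 2 ∧ d = 11) ∨ (distinct ≥ 1 ∧ d = 35) ∨ (distinct ≥ 1 ∧ d = 55) ∨ (distinct ≥ 1 ∧ d = 77) ∨ (distinct ≥ 0 ∧ d = 385) := by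
  rw [loop_step5] at hl
  split_ifs at hl with h1 hsq
  · have h := L7 _ _ hl
    rcases h with h|h|h|h <;> omega
  · have h := L7 _ _ hl
    rcases h with h|h|h|h <;> omega

set_option maxHeartbeats 1000000 in
lemma L3 (distinct d : Int) (hl : isSqfreeRichLoop [3, 5, 7, 11] distinct d 3 = true) :
    (distinct ≥ 3 ∧ d = 1) ∨ (distinct ≥ 2 ∧ d = 3) ∨ (distinct ≥ 2 ∧ d = 5) ∨ (distinct ≥ 2 ∧ d = 7) ∨ (distinct ≥ 2 ∧ d = 11) ∨ (distinct ≥ 1 ∧ d = 15) ∨ (distinct ≥ 1 ∧ d = 21) ∨ (distinct ≥ 1 ∧ d = 33) ∨ (distinct ≥ 1 ∧ d = 35) ∨ (distinct ≥ 1 ∧ d = 55) ∨ (distinct ≥ 1 ∧ d = 77) ∨ (distinct ≥ 0 ∧ d = 105) ∨ (distinct ≥ 0 ∧ d = 165) ∨ (distinct ≥ 0 ∧ d = 231) ∨ (distinct ≥ 0 ∧ d = 385) ∨ (distinct ≥ -1 ∧ d = 1155) := by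
  rw [loop_step3] at hl
  split_ifs at hl with h1 hsq
  · have h := L5 _ _ hl
    rcases h with h|h|h|h|h|h|h|h <;> omega
  · have h := L5 _ _ hl
    rcases h with h|h|h|h|h|h|h|h <;> omega

set_option maxHeartbeats 1000000 in
lemma L2 (distinct d : Int) (hl : isSqfreeRichLoop [2, 3, 5, 7, 11] distinct d 3 = true) :
    (distinct ≥ 3 ∧ d = 1) ∨ (distinct ≥ 2 ∧ d = 2) ∨ (distinct ≥ 2 ∧ d = 3) ∨ (distinct ≥ 2 ∧ d = 5) ∨ (distinct ≥ 2 ∧ d = 7) ∨ (distinct ≥ 2 ∧ d = 11) ∨ (distinct ≥ 1 ∧ d = 6) ∨ (distinct ≥ 1 ∧ d = 10) ∨ (distinct ≥ 1 ∧ d = 14) ∨ (distinct ≥ 1 ∧ d = 15) ∨ (distinct ≥ 1 ∧ d = 21) ∨ (distinct ≥ 1 ∧ d = 22) ∨ (distinct ≥ 1 ∧ d = 33) ∨ (distinct ≥ 1 ∧ d = 35) ∨ (distinct ≥ 1 ∧ d = 55) ∨ (distinct ≥ 1 ∧ d = 77) ∨ (distinct ≥ 0 ∧ d = 30) ∨ (distinct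 ≥ 0 ∧ d = 42) ∨ (distinct ≥ 0 ∧ d = 66) ∨ (distinct ≥ 0 ∧ d = 70) ∨ (distinct ≥ 0 ∧ d = 105) ∨ (distinct ≥ 0 ∧ d = 110) ∨ (distinct ≥ 0 ∧ d = 154) ∨ (distinct ≥ 0 ∧ d = 165) ∨ (distinct ≥ 0 ∧ d = 231) ∨ (distinct ≥ 0 ∧ d = 385) ∨ (distinct ≥ -1 ∧ d = 210) ∨ (distinct ≥ -1 ∧ d = 330) ∨ (distinct ≥ -1 ∧ d = 462) ∨ (distinct ≥ -1 ∧ d = 770) ∨ (distinct ≥ -1 ∧ d = 1155) ∨ (distinct ≥ -2 ∧ d = 2310) := by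
  rw [loop_step2] at hl
  split_ifs at hl with h1 hsq
  · have h := L3 _ _ hl
    rcases h with h|h|h|h|h|h|h|h|h|h|h|h|h|h|h|h <;> omega
  · have h := L3 _ _ hl
    rcases h with h|h|h|h|h|h|h|h|h|h|h|h|h|h|h|h <;> omega

set_option maxHeartbeats 1000000 in
lemma rich_iff_mem (n : Int) : is_sqfree_rich n 3 = true ↔ n ∈ pvValidB := by
  constructor
  · intro hr
    rw [is_sqfree_rich] at hr
    have h := L2 _ _ hr
    simp only [pvValidB, List.mem_cons, List.not_mem_nil, or_false]
    rcases h with h|h|h|h|h|h|h|h|h|h|h|h|h|h|h|h|h|h|h|h|h|h|h|h|h|h|h|h|h|h|h|h <;> omega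
  · intro h
    simp only [pvValidB, List.mem_cons, List.not_mem_nil, or_false] at h
    rcases h with h|h|h|h|h|h|h|h|h|h|h|h|h|h|h|h <;> subst h <;> decide

-- find? respects pointwise-equal predicates
lemma find?_ext {α : Type} (l : List α) (p q : α → Bool) (h : ∀ x ∈ l, p x = q x) :
    l.find? p = l.find? q := by
  induction l with
  | nil => rfl
  | cons a t ih =>
    simp only [List.find?]
    rw [h a (by simp)]
    cases q a with
    | true => rfl
    | false => exact ih fun x hx => h x (List.mem_cons_of_mem a hx)

-- A's scan from n is the first table entry in [n, 2*head_dim), defaulting to head_dim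
set_option maxHeartbeats 1000000 in
lemma loopA_eq_find (head_dim : Int) (k : Nat) (n : Int) (hk : (head_dim * 2 - n).toNat = k) :
    sqfreeLoopA head_dim n =
      ((pvValidB.find? fun x => decide (n ≤ x) && decide (x < 2 * head_dim))).getD head_dim := by
  induction k generalizing n with
  | zero =>
    rw [sqfreeLoopA]
    have hn : ¬ n < head_dim * 2 := by omega
    simp only [hn, dite_false]
    have : (pvValidB.find? fun x => decide (n ≤ x) && decide (x < 2 * head_dim)) = none := by
      apply List.find?_eq_none.mpr
      intro x hx
      simp only [pvValidB, List.mem_cons, List.not_mem_nil, or_false] at hx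
      rcases hx with h | h | h | h | h | h | h | h | h | h | h | h | h | h | h | h <;>
        subst h <;> simp <;> omega
    rw [this]; rfl
  | succ m ih =>
    rw [sqfreeLoopA]
    have hn : n < head_dim * 2 := by omega
    simp only [hn, dite_true]
    by_cases hr : is_sqfree_rich n 3 = true
    · simp only [hr, if_true]
      have h2 : n < 2 * head_dim := by omega
      have hmem : n ∈ pvValidB := (rich_iff_mem n).mp hr
      simp only [pvValidB, List.mem_cons, List.not_mem_nil, or_false] at hmem
      rcases hmem with h | h | h | h | h | h | h | h | h | h | h | h | h | h | h | h <;>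
        subst h <;> simp [pvValidB, List.find?, h2]
    · rw [Bool.not_eq_true] at hr
      simp only [hr, Bool.false_eq_true, if_false]
      rw [ih (n + 1) (by omega)]
      congr 1
      apply find?_ext
      intro x hx
      have hxn : x ≠ n := by
        intro he
        have ht := (rich_iff_mem n).mpr (he ▸ hx)
        rw [hr] at ht
        exact Bool.noConfusion ht
      have hdec : decide (n + 1 ≤ x) = decide (n ≤ x) :=
        decide_eq_decide.mpr ⟨fun h => by omega, fun h => by omega⟩
      rw [hdec]

-- ===== VERDICT (by name: the statement is the Claim_ definition above) =====
theorem sqfree_pad_dim_spec : Claim_equal_sqfree_pad_dim := by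
  intro head_dim _
  unfold Spec_sqfree_pad_dim sqfree_pad_dim sqfree_pad_dim_alt
  have htab : sqfreePadTableA = sqfreePadTableB := rfl
  rw [htab]
  cases sqfreePadTableB.get? head_dim with
  | some v => rfl
  | none => exact loopA_eq_find head_dim _ head_dim rfl
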